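-- pv_equiv track=rewrite | github.com/SpongeBobBang/RDFZ-Works | CH25/recursion2.py | split53
-- ===== SOURCE A (Python) =====
-- def split53(nums,start=0,l=0,r=0):
-- 	if start == len(nums):
-- 		return l == r
--
-- 	if nums[start]%3 == 0:
-- 		return split53(nums,start+1,l+3,r)
-- 	if nums[start]%5 == 0:
-- 		return split53(nums,start+1,l,r+5)
-- 	return split53(nums,start+1,l+nums[start],r) or split53(nums,start+1,l,r+nums[start])
-- ===== SOURCE B (Python) =====
-- def split53(nums, start=0, l=0, r=0):
--     # Subset-sum DP over the set of reachable values of (l - r); A's recursion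
--     # explores the 2^k branch tree, B keeps only the distinct reachable differences.
--     diffs = {l - r}
--     for i in range(start, len(nums)):
--         x = nums[i]
--         if x % 3 == 0:
--             diffs = {d + 3 for d in diffs}
--         elif x % 5 == 0:
--             diffs = {d - 5 for d in diffs}
--         else:
--             diffs = {d + x for d in diffs} | {d - x for d in diffs}
--     return 0 in diffs
-- ===== Notes on version B (the rewrite author's own statement) =====
-- stated objective: alternative
-- what changed: Replaces A's branch-per-choice recursion (one recursive call per left/right placement, combined with or) by a single forward pass that maintains the set of reachable l-r differences (subset-sum DP) and finally tests whether 0 is reachable.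
import Mathlib
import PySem

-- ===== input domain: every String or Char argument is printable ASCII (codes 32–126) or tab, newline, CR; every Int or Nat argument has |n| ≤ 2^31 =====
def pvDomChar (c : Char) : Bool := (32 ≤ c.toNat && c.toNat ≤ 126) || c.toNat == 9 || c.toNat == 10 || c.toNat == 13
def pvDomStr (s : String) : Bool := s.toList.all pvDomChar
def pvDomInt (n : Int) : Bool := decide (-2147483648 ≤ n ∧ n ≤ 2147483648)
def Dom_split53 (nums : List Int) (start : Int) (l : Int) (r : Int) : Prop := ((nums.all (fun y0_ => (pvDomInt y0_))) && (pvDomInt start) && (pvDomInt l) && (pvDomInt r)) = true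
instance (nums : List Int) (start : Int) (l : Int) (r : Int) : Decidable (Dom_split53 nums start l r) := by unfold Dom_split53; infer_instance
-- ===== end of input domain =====

-- B replaces A's branch-per-choice recursion by a single forward pass maintaining the set of reachable l-r differences (subset-sum DP), then tests reachability of 0.

-- ===== PORT A =====
def split53 (nums : List Int) (start : Int) (l : Int) (r : Int) : Bool :=
  if start == (nums.length : Int) then l == r
  else
    match _h : PySem.List.pyGet? nums start with
    | none => false  -- nums[start] raises IndexError here; excluded by Pre_split53
    | some x =>
      if PySem.Int.mod x 3 == 0 then split53 nums (start + 1) (l + 3) r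
      else if PySem.Int.mod x 5 == 0 then split53 nums (start + 1) l (r + 5)
      else split53 nums (start + 1) (l + x) r || split53 nums (start + 1) l (r + x)
termination_by ((nums.length : Int) - start).toNat
decreasing_by
  all_goals
    have h2 : PySem.List.pyGet? nums start ≠ none := by simp [_h]
    rw [Ne, PySem.List.pyGet?_eq_none_iff, not_not] at h2
    simp [PySem.Raise.InRange] at h2
    omega

-- ===== PORT B =====
-- one loop-body step: the three set comprehensions of Source B
def altStep (ds : PySem.Set Int) (x : Int) : PySem.Set Int :=
  if PySem.Int.mod x 3 == 0 then PySem.Set.ofList (ds.map (· + 3))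
  else if PySem.Int.mod x 5 == 0 then PySem.Set.ofList (ds.map (· - 5))
  else PySem.Set.union (PySem.Set.ofList (ds.map (· + x))) (ds.map (· - x))

def altBody (nums : List Int) (ds : PySem.Set Int) (i : Int) : PySem.Set Int :=
  match PySem.List.pyGet? nums i with
  | none => ds   -- nums[i] raises IndexError in B too; excluded by Pre_split53
  | some x => altStep ds x

def split53_alt (nums : List Int) (start : Int) (l : Int) (r : Int) : Bool :=
  let diffs := (PySem.List.pyRange start (nums.length : Int) 1).foldl (altBody nums)
      (PySem.Set.ofList [l - r])
  PySem.Set.contains diffs 0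

-- ===== PRECONDITION & SPEC =====
-- Pre_ excludes exactly the inputs where A raises IndexError (start beyond either end of nums).
def Pre_split53 (nums : List Int) (start : Int) (l : Int) (r : Int) : Prop :=
  -(nums.length : Int) ≤ start ∧ start ≤ (nums.length : Int)
instance (nums : List Int) (start : Int) (l : Int) (r : Int) : Decidable (Pre_split53 nums start l r) := by unfold Pre_split53; infer_instance
def pvWitness_split53 : List Int × Int × Int × Int := ([1, 3, 5, 2], 0, 0, 0)

def Spec_split53 (nums : List Int) (start : Int) (l : Int) (r : Int) (out : Bool) : Prop := out = split53_alt nums start l r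
instance (nums : List Int) (start : Int) (l : Int) (r : Int) (out : Bool) : Decidable (Spec_split53 nums start l r out) := by unfold Spec_split53; infer_instance

-- ===== CLAIM (what is proved, stated in full; the proofs are below) =====
def Claim_equal_split53 : Prop := ∀ (nums : List Int) (start : Int) (l : Int) (r : Int), Dom_split53 nums start l r → Pre_split53 nums start l r → Spec_split53 nums start l r (split53 nums start l r)

-- ===== LEMMAS AND PROOFS =====

lemma ofList_single (a : Int) : PySem.Set.ofList [a] = [a] := rfl

-- altStep distributes over the elements of its input set (membership-wise)
lemma mem_altStep (ds : PySem.Set Int) (x t : Int) :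
    t ∈ altStep ds x ↔ ∃ d ∈ ds, t ∈ altStep [d] x := by
  unfold altStep
  split_ifs <;>
    simp [PySem.Set.mem_ofList, PySem.Set.mem_union, List.mem_map] <;>
    aesop

lemma mem_altBody (nums : List Int) (ds : PySem.Set Int) (i t : Int) :
    t ∈ altBody nums ds i ↔ ∃ d ∈ ds, t ∈ altBody nums [d] i := by
  unfold altBody
  cases PySem.List.pyGet? nums i with
  | none => simp
  | some x => exact mem_altStep ds x t

-- the whole loop distributes over the elements of its initial set (membership-wise)
lemma mem_foldl (nums idxs : List Int) (ds : PySem.Set Int) (t : Int) :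
    t ∈ idxs.foldl (altBody nums) ds ↔ ∃ d ∈ ds, t ∈ idxs.foldl (altBody nums) [d] := by
  induction idxs generalizing ds with
  | nil => simp
  | cons i idxs ih =>
    simp only [List.foldl_cons]
    rw [ih]
    constructor
    · rintro ⟨e, he, ht⟩
      obtain ⟨d, hd, he'⟩ := (mem_altBody nums ds i e).1 he
      exact ⟨d, hd, (ih _).2 ⟨e, he', ht⟩⟩
    · rintro ⟨d, hd, ht⟩
      obtain ⟨e, he, ht'⟩ := (ih _).1 ht
      exact ⟨e, (mem_altBody nums ds i e).2 ⟨d, hd, he⟩, ht'⟩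

-- main invariant: A from (start, l, r) answers whether 0 is reachable from the singleton {l - r}
theorem split_eq_mem (nums : List Int) (start l r : Int)
    (h1 : -(nums.length : Int) ≤ start) (h2 : start ≤ (nums.length : Int)) :
    split53 nums start l r =
      decide (0 ∈ (PySem.List.pyRange start (nums.length : Int) 1).foldl (altBody nums) [l - r]) := by
  by_cases hs : start = (nums.length : Int)
  · rw [split53]
    simp only [hs, beq_self_eq_true, if_true, PySem.List.pyRange_one_eq_nil le_rfl, List.foldl_nil]
    rw [Bool.eq_iff_iff]
    simp only [beq_iff_eq, decide_eq_true_eq, List.mem_singleton]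
    omega
  · have h3 : start < (nums.length : Int) := lt_of_le_of_ne h2 hs
    obtain ⟨x, hx⟩ : ∃ x, PySem.List.pyGet? nums start = some x := by
      cases hc : PySem.List.pyGet? nums start with
      | none =>
        rw [PySem.List.pyGet?_eq_none_iff] at hc
        exact absurd (by simp [PySem.Raise.InRange]; omega) hc
      | some x => exact ⟨x, rfl⟩
    have h1' : -(nums.length : Int) ≤ start + 1 := by omega
    have h2' : start + 1 ≤ (nums.length : Int) := by omega
    rw [split53, PySem.List.pyRange_one_cons h3, List.foldl_cons]
    rw [if_neg (by simp [hs])]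
    have hbody : altBody nums [l - r] start = altStep [l - r] x := by simp [altBody, hx]
    rw [hbody]
    split
    case _ heq => rw [hx] at heq; exact absurd heq (by simp)
    case _ y heq =>
    rw [hx] at heq
    injection heq with heq
    subst heq
    by_cases hm3 : PySem.Int.mod x 3 = 0
    · have hst : altStep [l - r] x = [l + 3 - r] := by
        unfold altStep
        rw [if_pos (by simp only [beq_iff_eq]; exact hm3)]
        show PySem.Set.ofList [l - r + 3] = [l + 3 - r]
        rw [ofList_single]; congr 1; omega
      rw [if_pos (by simp only [beq_iff_eq]; exact hm3), hst, split_eq_mem nums (start+1) (l+3) r h1' h2']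
    · by_cases hm5 : PySem.Int.mod x 5 = 0
      · have hst : altStep [l - r] x = [l - (r + 5)] := by
          unfold altStep
          rw [if_neg (by simp only [beq_iff_eq]; exact hm3), if_pos (by simp only [beq_iff_eq]; exact hm5)]
          show PySem.Set.ofList [l - r - 5] = [l - (r + 5)]
          rw [ofList_single]; congr 1; omega
        rw [if_neg (by simp only [beq_iff_eq]; exact hm3), if_pos (by simp only [beq_iff_eq]; exact hm5), hst,
            split_eq_mem nums (start+1) l (r+5) h1' h2']
      · rw [if_neg (by simp only [beq_iff_eq]; exact hm3), if_neg (by simp only [beq_iff_eq]; exact hm5),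
            split_eq_mem nums (start+1) (l+x) r h1' h2',
            split_eq_mem nums (start+1) l (r+x) h1' h2']
        have hset : ∀ d, d ∈ altStep [l - r] x ↔ d = l + x - r ∨ d = l - (r + x) := by
          intro d
          unfold altStep
          rw [if_neg (by simp only [beq_iff_eq]; exact hm3), if_neg (by simp only [beq_iff_eq]; exact hm5)]
          simp only [PySem.Set.mem_union, PySem.Set.mem_ofList, List.mem_map, List.mem_singleton]
          constructor
          · rintro (⟨e, he, h⟩ | ⟨e, he, h⟩) <;> subst he <;> omega
          · rintro (h | h)
            · exact Or.inl ⟨l - r, rfl, by omega⟩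
            · exact Or.inr ⟨l - r, rfl, by omega⟩
        rw [Bool.eq_iff_iff]
        simp only [Bool.or_eq_true, decide_eq_true_eq]
        conv_rhs => rw [mem_foldl]
        constructor
        · rintro (h | h)
          · exact ⟨l + x - r, (hset _).2 (Or.inl rfl), h⟩
          · exact ⟨l - (r + x), (hset _).2 (Or.inr rfl), h⟩
        · rintro ⟨d, hd, h⟩
          rcases (hset d).1 hd with h' | h' <;> subst h'
          · exact Or.inl h
          · exact Or.inr h
termination_by ((nums.length : Int) - start).toNat
decreasing_by all_goals omega

-- ===== VERDICT (by name: the statement is the Claim_ definition above) =====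
theorem split53_spec : Claim_equal_split53 := by
  intro nums start l r _hdom hpre
  obtain ⟨h1, h2⟩ := hpre
  show split53 nums start l r = split53_alt nums start l r
  rw [split_eq_mem nums start l r h1 h2]
  unfold split53_alt
  rw [ofList_single, Bool.eq_iff_iff]
  simp [PySem.Set.contains_eq_listContains]
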